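-- pv_equiv track=rewrite | github.com/ameforce/windows-supporter | src/apps/KakaoManager.py | __iter_slots
-- ===== SOURCE A (Python) =====
-- def __iter_slots(monitors, w: int, h: int, primary_handle, y_base: int):
--     for row in range(0, 256):
--         for hmon, work in monitors:
--             left, top, right, bottom = work
--             base_y = y_base
--             if base_y < top:
--                 base_y = top
--             max_y0 = bottom - h
--             if max_y0 < top:
--                 max_y0 = top
--             if base_y > max_y0:
--                 base_y = max_y0
--
--             y = base_y + row * h
--             if y + h > bottom:
--                 continue
--
--             cols = int((right - left) // w)
--             if cols <= 0:
--                 continue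
--
--             start_col = 1 if hmon == primary_handle else 0
--             if start_col >= cols:
--                 continue
--
--             for col in range(start_col, cols):
--                 x = left + (col * w)
--                 if x + w > right:
--                     break
--                 yield (x, y)
--     return
-- ===== SOURCE B (Python) =====
-- def __iter_slots(monitors, w: int, h: int, primary_handle, y_base: int):
--     # Precompute per-monitor geometry once, then enumerate rows over the table.
--     table = []
--     for hmon, (left, top, right, bottom) in monitors:
--         base_y = min(max(y_base, top), max(bottom - h, top))
--         # y + h is monotone in the row, so some row in 0..255 fits iff an endpoint row fits
--         if min(base_y + h, base_y + 256 * h) > bottom: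
--             continue
--         cols = (right - left) // w
--         start_col = 1 if hmon == primary_handle else 0
--         xs = []
--         for col in range(start_col, cols):
--             x = left + col * w
--             if x + w > right:
--                 break
--             xs.append(x)
--         table.append((base_y, bottom, xs))
--     for row in range(256):
--         for base_y, bottom, xs in table:
--             y = base_y + row * h
--             if y + h > bottom:
--                 continue
--             for x in xs:
--                 yield (x, y)
-- ===== Notes on version B (the rewrite author's own statement) =====
-- stated objective: faster
-- what changed: B precomputes a per-monitor table (clamped base_y, bottom, and the column x-list with its break) once and skips monitors no row can fit, then enumerates the 256 rows over that table, instead of recomputing clamps, column count, start column and the column loop for every row-monitor pair.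
import Mathlib
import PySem

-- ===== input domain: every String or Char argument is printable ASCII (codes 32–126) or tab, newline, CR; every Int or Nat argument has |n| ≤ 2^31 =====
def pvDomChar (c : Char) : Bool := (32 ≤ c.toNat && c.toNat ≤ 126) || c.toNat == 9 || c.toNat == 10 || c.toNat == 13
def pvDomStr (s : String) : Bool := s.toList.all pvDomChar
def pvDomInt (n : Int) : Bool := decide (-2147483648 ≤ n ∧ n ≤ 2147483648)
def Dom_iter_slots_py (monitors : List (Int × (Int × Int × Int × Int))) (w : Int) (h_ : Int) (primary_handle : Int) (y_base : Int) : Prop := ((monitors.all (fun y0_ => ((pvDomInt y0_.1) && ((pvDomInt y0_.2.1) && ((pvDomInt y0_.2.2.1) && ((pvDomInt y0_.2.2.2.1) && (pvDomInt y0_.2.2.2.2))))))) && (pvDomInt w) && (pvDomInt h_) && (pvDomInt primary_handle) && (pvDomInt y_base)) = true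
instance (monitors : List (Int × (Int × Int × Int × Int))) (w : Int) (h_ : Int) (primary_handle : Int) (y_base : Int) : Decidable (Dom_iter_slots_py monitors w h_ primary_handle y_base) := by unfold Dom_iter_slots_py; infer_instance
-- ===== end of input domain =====

-- B precomputes each monitor's clamped base_y, bottom and column list once, then enumerates rows over that table (simpler decomposition, same yield order).

-- ===== PORT A =====
-- inner 'for col in range(start_col, cols)' with its break
def pvColLoopA (cs : List Int) (left w right y : Int) : List (Int × Int) :=
  match cs with
  | [] => []
  | c :: rest =>
    let x := left + c * w
    if x + w > right then []
    else (x, y) :: pvColLoopA rest left w right y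

-- body of the 'for hmon, work in monitors' loop for one row: the slots yielded there
def pvMonBodyA (w h_ primary_handle y_base row : Int) (m : Int × (Int × Int × Int × Int)) : List (Int × Int) :=
  let hmon := m.1
  let left := m.2.1
  let top := m.2.2.1
  let right := m.2.2.2.1
  let bottom := m.2.2.2.2
  let base_y := y_base
  let base_y := if base_y < top then top else base_y
  let max_y0 := bottom - h_
  let max_y0 := if max_y0 < top then top else max_y0
  let base_y := if base_y > max_y0 then max_y0 else base_y
  let y := base_y + row * h_
  if y + h_ > bottom then []
  else
    let cols := PySem.Int.floordiv (right - left) w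
    if cols ≤ 0 then []
    else
      let start_col : Int := if hmon == primary_handle then 1 else 0
      if start_col ≥ cols then []
      else pvColLoopA (PySem.List.pyRange start_col cols 1) left w right y

def iter_slots_py (monitors : List (Int × (Int × Int × Int × Int))) (w : Int) (h_ : Int) (primary_handle : Int) (y_base : Int) : List (Int × Int) :=
  (PySem.List.pyRange 0 256 1).flatMap (fun row =>
    monitors.flatMap (pvMonBodyA w h_ primary_handle y_base row))

-- ===== PORT B =====
-- the xs list of one monitor (column loop with its break, x-coordinates only)
def pvXsLoop (cs : List Int) (left w right : Int) : List Int :=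
  match cs with
  | [] => []
  | c :: rest =>
    let x := left + c * w
    if x + w > right then []
    else x :: pvXsLoop rest left w right

-- one table entry: (clamped base_y, bottom, xs)
def pvMonEntry (w h_ primary_handle y_base : Int) (m : Int × (Int × Int × Int × Int)) : Int × Int × List Int :=
  let hmon := m.1
  let left := m.2.1
  let top := m.2.2.1
  let right := m.2.2.2.1
  let bottom := m.2.2.2.2
  let base_y := min (max y_base top) (max (bottom - h_) top)
  let cols := PySem.Int.floordiv (right - left) w
  let start_col : Int := if hmon == primary_handle then 1 else 0
  (base_y, bottom, pvXsLoop (PySem.List.pyRange start_col cols 1) left w right)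

-- slots of one table entry for one row
def pvEmit (h_ row : Int) (e : Int × Int × List Int) : List (Int × Int) :=
  let y := e.1 + row * h_
  if y + h_ > e.2.1 then []
  else e.2.2.map (fun x => (x, y))

def iter_slots_py_alt (monitors : List (Int × (Int × Int × Int × Int))) (w : Int) (h_ : Int) (primary_handle : Int) (y_base : Int) : List (Int × Int) :=
  -- the table skips monitors no row can fit (y + h is monotone in the row, so the endpoint rows decide)
  let table := monitors.filterMap (fun m =>
    let e := pvMonEntry w h_ primary_handle y_base m
    if min (e.1 + h_) (e.1 + 256 * h_) > e.2.1 then none else some e)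
  (PySem.List.pyRange 0 256 1).flatMap (fun row =>
    table.flatMap (pvEmit h_ row))

-- ===== PRECONDITION & SPEC =====
-- Pre_ excludes exactly the inputs on which A (and B) raise ZeroDivisionError: w = 0 while some monitor passes the per-row y-check for some row (by monotonicity of y in the row, iff an endpoint row fits).
def Pre_iter_slots_py (monitors : List (Int × (Int × Int × Int × Int))) (w : Int) (h_ : Int) (primary_handle : Int) (y_base : Int) : Prop :=
  w ≠ 0 ∨ monitors.all (fun m =>
    decide (min (min (max y_base m.2.2.1) (max (m.2.2.2.2 - h_) m.2.2.1) + h_)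
                (min (max y_base m.2.2.1) (max (m.2.2.2.2 - h_) m.2.2.1) + 256 * h_) > m.2.2.2.2)) = true
instance (monitors : List (Int × (Int × Int × Int × Int))) (w : Int) (h_ : Int) (primary_handle : Int) (y_base : Int) : Decidable (Pre_iter_slots_py monitors w h_ primary_handle y_base) := by unfold Pre_iter_slots_py; infer_instance

def pvWitness_iter_slots_py : (List (Int × (Int × Int × Int × Int))) × Int × Int × Int × Int := ([(1, (0, 0, 100, 100))], 10, 10, 1, 0)

def Spec_iter_slots_py (monitors : List (Int × (Int × Int × Int × Int))) (w : Int) (h_ : Int) (primary_handle : Int) (y_base : Int) (out : List (Int × Int)) : Prop := out = iter_slots_py_alt monitors w h_ primary_handle y_base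
instance (monitors : List (Int × (Int × Int × Int × Int))) (w : Int) (h_ : Int) (primary_handle : Int) (y_base : Int) (out : List (Int × Int)) : Decidable (Spec_iter_slots_py monitors w h_ primary_handle y_base out) := by unfold Spec_iter_slots_py; infer_instance

-- ===== CLAIM (what is proved, stated in full; the proofs are below) =====
def Claim_equal_iter_slots_py : Prop := ∀ (monitors : List (Int × (Int × Int × Int × Int))) (w : Int) (h_ : Int) (primary_handle : Int) (y_base : Int), Dom_iter_slots_py monitors w h_ primary_handle y_base → Pre_iter_slots_py monitors w h_ primary_handle y_base → Spec_iter_slots_py monitors w h_ primary_handle y_base (iter_slots_py monitors w h_ primary_handle y_base)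

-- ===== LEMMAS AND PROOFS =====

lemma pv_if_lt_eq_max (a b : Int) : (if a < b then b else a) = max a b := by
  split_ifs with h
  · exact (max_eq_right h.le).symm
  · exact (max_eq_left (not_lt.mp h)).symm

lemma pv_if_gt_eq_min (a b : Int) : (if a > b then b else a) = min a b := by
  split_ifs with h
  · exact (min_eq_right h.le).symm
  · exact (min_eq_left (not_lt.mp h)).symm

lemma pvColLoop_eq_map (cs : List Int) (l w r y : Int) :
    pvColLoopA cs l w r y = (pvXsLoop cs l w r).map (fun x => (x, y)) := by
  induction cs with
  | nil => simp [pvColLoopA, pvXsLoop]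
  | cons c rest ih =>
    simp only [pvColLoopA, pvXsLoop]
    split_ifs with h
    · simp
    · simp [ih]

lemma pvGuards_eq (l w r y cols sc : Int) (h0 : 0 ≤ sc) (h1 : sc ≤ 1) :
    (if cols ≤ 0 then ([] : List (Int × Int))
     else if sc ≥ cols then []
     else pvColLoopA (PySem.List.pyRange sc cols 1) l w r y)
      = (pvXsLoop (PySem.List.pyRange sc cols 1) l w r).map (fun x => (x, y)) := by
  split_ifs with hc hs
  · rw [PySem.List.pyRange_one_eq_nil (by omega)]; simp [pvXsLoop]
  · rw [PySem.List.pyRange_one_eq_nil (by omega)]; simp [pvXsLoop]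
  · exact pvColLoop_eq_map _ _ _ _ _

lemma pvMonBody_eq (w h_ ph yb row : Int) (m : Int × (Int × Int × Int × Int)) :
    pvMonBodyA w h_ ph yb row m = pvEmit h_ row (pvMonEntry w h_ ph yb m) := by
  obtain ⟨hmon, l, t, r, b⟩ := m
  simp only [pvMonBodyA, pvMonEntry, pvEmit, pv_if_lt_eq_max, pv_if_gt_eq_min]
  by_cases hy : min (max yb t) (max (b - h_) t) + row * h_ + h_ > b
  · simp [hy]
  · simp only [if_neg hy]
    exact pvGuards_eq l w r _ _ _ (by split <;> omega) (by split <;> omega)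

-- a monitor no row can fit contributes nothing in any row 0 ≤ row < 256
lemma pvMonBody_skip (w h_ ph yb row : Int) (m : Int × (Int × Int × Int × Int))
    (hrow0 : 0 ≤ row) (hrow1 : row < 256)
    (hskip : min ((pvMonEntry w h_ ph yb m).1 + h_) ((pvMonEntry w h_ ph yb m).1 + 256 * h_) > (pvMonEntry w h_ ph yb m).2.1) :
    pvMonBodyA w h_ ph yb row m = [] := by
  obtain ⟨hmon, l, t, r, b⟩ := m
  simp only [pvMonEntry] at hskip
  simp only [pvMonBodyA, pv_if_lt_eq_max, pv_if_gt_eq_min]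
  rw [if_pos]
  rcases (by omega : 0 ≤ h_ ∨ h_ < 0) with hh | hh
  · nlinarith [min_le_left (min (max yb t) (max (b - h_) t) + h_) (min (max yb t) (max (b - h_) t) + 256 * h_)]
  · nlinarith [min_le_right (min (max yb t) (max (b - h_) t) + h_) (min (max yb t) (max (b - h_) t) + 256 * h_)]

-- one row: scanning the monitors equals scanning the filtered table
lemma pvRow_eq (w h_ ph yb row : Int) (monitors : List (Int × (Int × Int × Int × Int)))
    (hrow0 : 0 ≤ row) (hrow1 : row < 256) :
    monitors.flatMap (pvMonBodyA w h_ ph yb row)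
      = (monitors.filterMap (fun m =>
          let e := pvMonEntry w h_ ph yb m
          if min (e.1 + h_) (e.1 + 256 * h_) > e.2.1 then none else some e)).flatMap (pvEmit h_ row) := by
  induction monitors with
  | nil => simp
  | cons m ms ih =>
    simp only [List.flatMap_cons, List.filterMap_cons]
    split_ifs with hsk
    · rw [pvMonBody_skip w h_ ph yb row m hrow0 hrow1 hsk, ih]
      simp
    · simp only [List.flatMap_cons, ih, pvMonBody_eq]

-- ===== VERDICT (by name: the statement is the Claim_ definition above) =====
theorem iter_slots_py_spec : Claim_equal_iter_slots_py := by
  intro monitors w h_ ph yb _hdom _hpre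
  show iter_slots_py monitors w h_ ph yb = iter_slots_py_alt monitors w h_ ph yb
  simp only [iter_slots_py, iter_slots_py_alt, List.flatMap]
  refine congrArg List.flatten (List.map_congr_left fun row hrow => ?_)
  obtain ⟨h0, h1⟩ := (PySem.List.mem_pyRange_one).mp hrow
  exact pvRow_eq w h_ ph yb row monitors h0 h1
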